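-- pv_equiv track=rewrite | github.com/msimmara/NoSpeulers | Euler/Euler.py | isNPandigital
-- ===== SOURCE A (Python) =====
-- def isNPandigital(number):
--     tempNumb = str(number)
--     n = len(tempNumb)
--     nums = [(0 if i<n else -1) for i in range(0,10)]
--     hits = 0
--     for dig in tempNumb:
--         digInd = int(dig)-1
--         if(digInd==-1 or nums[digInd]!=0): return False
--         nums[digInd] = 1
--         hits+=1
--     return hits==n
-- ===== SOURCE B (Python) =====
-- def isNPandigital(number):
--     digits = [int(c) for c in str(number)]
--     return sorted(digits) == list(range(1, len(digits) + 1))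
-- ===== Notes on version B (the rewrite author's own statement) =====
-- stated objective: simpler
-- what changed: Replaces A's single-pass fixed marker-array membership/duplicate check by converting the digits once and testing that sorting them yields exactly the consecutive run starting at one (permutation check).
import Mathlib
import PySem

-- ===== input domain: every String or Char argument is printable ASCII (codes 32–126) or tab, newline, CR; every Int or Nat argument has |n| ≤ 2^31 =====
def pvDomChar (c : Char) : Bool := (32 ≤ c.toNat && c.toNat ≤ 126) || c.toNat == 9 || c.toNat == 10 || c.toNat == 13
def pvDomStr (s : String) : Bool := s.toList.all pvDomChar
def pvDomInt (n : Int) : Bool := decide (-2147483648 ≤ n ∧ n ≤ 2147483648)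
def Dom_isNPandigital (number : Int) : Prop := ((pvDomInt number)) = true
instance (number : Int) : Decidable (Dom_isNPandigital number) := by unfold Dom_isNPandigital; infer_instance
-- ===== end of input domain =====

-- B replaces A's single-pass marker-array scan by sorting the digit list and comparing it with the consecutive run starting at one; objective: simpler.

-- ===== PORT A =====
-- the for-loop of A; early 'return False' becomes returning false
def pvNPLoop (n : Int) (nums : List Int) (hits : Int) (chars : List Char) : Bool :=
  match chars with
  | [] => hits == n
  | dig :: rest =>
    match PySem.Int.ofChars? [dig] with
    | none => false        -- int(dig) raises ValueError; reachable only outside Pre_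
    | some v =>
      let digInd : Int := v - 1
      if digInd == -1 then false
      else
        match PySem.List.pyGet? nums digInd with
        | none => false    -- IndexError (unreachable: digInd is 0..8, len(nums)=10)
        | some x =>
          if x != 0 then false
          else
            match PySem.List.pySet? nums digInd 1 with
            | none => false  -- IndexError (unreachable, same bound)
            | some nums' => pvNPLoop n nums' (hits + 1) rest

def isNPandigital (number : Int) : Bool :=
  let tempNumb := (PySem.Int.toStr number).toList
  let n : Int := (tempNumb.length : Int)
  let nums := (PySem.List.pyRange 0 10 1).map (fun i => if i < n then (0 : Int) else -1)
  pvNPLoop n nums 0 tempNumb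

-- ===== PORT B =====
def isNPandigital_alt (number : Int) : Bool :=
  match ((PySem.Int.toStr number).toList).mapM (fun c => PySem.Int.ofChars? [c]) with
  | none => false          -- int(c) raises ValueError; reachable only outside Pre_
  | some digits =>
    PySem.List.sorted digits (fun x => x) false == PySem.List.pyRange 1 ((digits.length : Int) + 1) 1

-- ===== PRECONDITION & SPEC =====
-- Pre_ excludes exactly the negative numbers: str(number) then starts with '-' and int('-') raises ValueError in A.
def Pre_isNPandigital (number : Int) : Prop := 0 ≤ number
instance (number : Int) : Decidable (Pre_isNPandigital number) := by unfold Pre_isNPandigital; infer_instance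
def pvWitness_isNPandigital : Int := 123

def Spec_isNPandigital (number : Int) (out : Bool) : Prop := out = isNPandigital_alt number
instance (number : Int) (out : Bool) : Decidable (Spec_isNPandigital number out) := by unfold Spec_isNPandigital; infer_instance

-- ===== CLAIM (what is proved, stated in full; the proofs are below) =====
def Claim_equal_isNPandigital : Prop := ∀ (number : Int), Dom_isNPandigital number → Pre_isNPandigital number → Spec_isNPandigital number (isNPandigital number)

-- ===== LEMMAS AND PROOFS =====

-- digit values of a char list
def pvVals (cs : List Char) : List Int := cs.map (fun c => (c.toNat : Int) - 48)

-- the marker array of A after the digits in 'seen' have been recorded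
def pvNums (n : Int) (seen : List Int) : List Int :=
  (PySem.List.pyRange 0 10 1).map (fun i => if (i + 1) ∈ seen then 1 else if i < n then 0 else -1)

theorem pv_digit_mem (c : Char) (h : c.isDigit = true) :
    c ∈ ['0','1','2','3','4','5','6','7','8','9'] := by
  have hb : 48 ≤ c.toNat ∧ c.toNat ≤ 57 := by
    simp only [Char.isDigit, Bool.and_eq_true, decide_eq_true_eq, ge_iff_le,
      UInt32.le_iff_toNat_le] at h
    exact ⟨h.1, h.2⟩
  obtain ⟨h1, h2⟩ := hb
  rw [← Char.ofNat_toNat c]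
  interval_cases c.toNat <;> decide

theorem pv_ofChars_digit (c : Char) (h : c.isDigit = true) :
    PySem.Int.ofChars? [c] = some ((c.toNat : Int) - 48) := by
  have := pv_digit_mem c h
  fin_cases this <;> decide

theorem pv_digit_bounds (c : Char) (h : c.isDigit = true) :
    0 ≤ (c.toNat : Int) - 48 ∧ (c.toNat : Int) - 48 ≤ 9 := by
  have := pv_digit_mem c h
  fin_cases this <;> decide

theorem pv_toDigitsCore_digits (fuel n : Nat) (l : List Char) (hl : ∀ c ∈ l, c.isDigit = true) :
    ∀ c ∈ Nat.toDigitsCore 10 fuel n l, c.isDigit = true := by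
  induction fuel generalizing n l with
  | zero => simpa [Nat.toDigitsCore] using hl
  | succ f ih =>
    simp only [Nat.toDigitsCore]
    split
    · intro c hc
      rcases List.mem_cons.mp hc with rfl | hc
      · have : n % 10 < 10 := Nat.mod_lt _ (by norm_num)
        interval_cases h : n % 10 <;> decide
      · exact hl c hc
    · exact ih _ _ (by
        intro c hc
        rcases List.mem_cons.mp hc with rfl | hc
        · have : n % 10 < 10 := Nat.mod_lt _ (by norm_num)
          interval_cases h : n % 10 <;> decide
        · exact hl c hc)

theorem pv_toChars_digits (m : Int) (hm : 0 ≤ m) :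
    ∀ c ∈ PySem.Int.toChars m, c.isDigit = true := by
  unfold PySem.Int.toChars
  rw [if_neg (by omega)]
  exact pv_toDigitsCore_digits _ _ [] (by simp)

theorem pv_length_pvNums (n : Int) (seen : List Int) : (pvNums n seen).length = 10 := by
  simp [pvNums, PySem.List.length_pyRange_one]

theorem pv_set_pvNums (n : Int) (seen : List Int) (d : Int) (h1 : 1 ≤ d) (h9 : d ≤ 9) :
    (pvNums n seen).set (d - 1).toNat 1 = pvNums n (d :: seen) := by
  apply List.ext_getElem
  · simp [pvNums, PySem.List.length_pyRange_one]
  · intro i hi hi'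
    have h10 : i < 10 := by simpa [pv_length_pvNums] using hi'
    have hlen : i < (PySem.List.pyRange 0 10 1).length := by
      simpa [PySem.List.length_pyRange_one] using h10
    rw [List.getElem_set]
    by_cases he : (d - 1).toNat = i
    · have hdi : (0 : Int) + (i : Int) + 1 = d ∨ (0 : Int) + (i : Int) + 1 ∈ seen :=
        Or.inl (by omega)
      simp only [if_pos he, pvNums, List.getElem_map, PySem.List.getElem_pyRange_one,
        List.mem_cons]
      rw [if_pos hdi]
    · have hdi : ¬ ((i : Int) + 1 = d) := by omega
      simp only [if_neg he, pvNums, List.getElem_map, PySem.List.getElem_pyRange_one,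
        List.mem_cons]
      simp [hdi]

theorem pvLoop_eq (cs : List Char) (n : Int) (seen : List Int) (hits : Int)
    (hd : ∀ c ∈ cs, c.isDigit = true) :
    pvNPLoop n (pvNums n seen) hits cs =
      decide ((hits + (cs.length : Int) = n) ∧ (pvVals cs).Nodup ∧
        ∀ d ∈ pvVals cs, 1 ≤ d ∧ d ≤ n ∧ d ∉ seen) := by
  induction cs generalizing seen hits with
  | nil =>
    simp only [pvNPLoop, pvVals, List.map_nil, List.length_nil, Nat.cast_zero, add_zero,
      List.nodup_nil, List.not_mem_nil, false_implies, implies_true, and_true]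
    by_cases h : hits = n <;> simp [h]
  | cons c rest ih =>
    have hc := hd c (by simp)
    obtain ⟨hd0, hd9⟩ := pv_digit_bounds c hc
    have hvals : pvVals (c :: rest) = ((c.toNat : Int) - 48) :: pvVals rest := by simp [pvVals]
    simp only [pvNPLoop, pv_ofChars_digit c hc]
    by_cases h0 : (c.toNat : Int) - 48 = 0
    · rw [if_pos (by rw [beq_iff_eq]; omega)]
      symm
      rw [decide_eq_false_iff_not]
      rintro ⟨-, -, h3⟩
      have := h3 ((c.toNat : Int) - 48) (by simp [pvVals])
      omega
    · rw [if_neg (by rw [beq_iff_eq]; omega)]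
      have hk : (((((c.toNat : Int) - 48) - 1).toNat : Int)) = ((c.toNat : Int) - 48) - 1 := by
        omega
      have hklen : ((((c.toNat : Int) - 48) - 1).toNat) < (PySem.List.pyRange 0 10 1).length := by
        rw [PySem.List.length_pyRange_one]; omega
      have hval : PySem.List.pyGet? (pvNums n seen) (((c.toNat : Int) - 48) - 1) =
          some (if ((c.toNat : Int) - 48) ∈ seen then (1 : Int)
            else if ((c.toNat : Int) - 48) - 1 < n then 0 else -1) := by
        rw [← hk, PySem.List.pyGet?_natCast, pvNums, List.getElem?_map,
          List.getElem?_eq_getElem hklen, PySem.List.getElem_pyRange_one]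
        simp only [Option.map_some]
        rw [hk]
        have he : (0 : Int) + (((c.toNat : Int) - 48) - 1) + 1 = (c.toNat : Int) - 48 := by omega
        rw [show (0 : Int) + (((c.toNat : Int) - 48) - 1) = ((c.toNat : Int) - 48) - 1 from by
          omega] at he ⊢
        rw [he]
      by_cases hseen : ((c.toNat : Int) - 48) ∈ seen
      · have hval1 : PySem.List.pyGet? (pvNums n seen) (((c.toNat : Int) - 48) - 1) =
            some (1 : Int) := by rw [hval, if_pos hseen]
        simp only [hval1]
        rw [if_pos (by decide)]
        symm
        rw [decide_eq_false_iff_not]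
        rintro ⟨-, -, h3⟩
        exact (h3 ((c.toNat : Int) - 48) (by simp [pvVals])).2.2 hseen
      · by_cases hlt : ((c.toNat : Int) - 48) - 1 < n
        · have hval0 : PySem.List.pyGet? (pvNums n seen) (((c.toNat : Int) - 48) - 1) =
              some (0 : Int) := by rw [hval, if_neg hseen, if_pos hlt]
          simp only [hval0]
          rw [if_neg (by decide)]
          have hset : PySem.List.pySet? (pvNums n seen) (((c.toNat : Int) - 48) - 1) 1 =
              some (pvNums n (((c.toNat : Int) - 48) :: seen)) := by
            rw [← hk, PySem.List.pySet?_natCast _ _ _ (by rw [pv_length_pvNums]; omega),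
              pv_set_pvNums n seen _ (by omega) (by omega)]
          simp only [hset]
          rw [ih _ _ (fun x hx => hd x (List.mem_cons_of_mem _ hx))]
          rw [hvals, decide_eq_decide]
          constructor
          · rintro ⟨ha, hb', hc'⟩
            refine ⟨by simp only [List.length_cons]; push_cast; omega, ?_, ?_⟩
            · rw [List.nodup_cons]
              refine ⟨fun hmem => ?_, hb'⟩
              have := hc' _ hmem
              simp at this
            · intro x hx
              rcases List.mem_cons.mp hx with rfl | hx
              · exact ⟨by omega, by omega, hseen⟩
              · have := hc' x hx
                simp only [List.mem_cons, not_or] at this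
                exact ⟨this.1, this.2.1, this.2.2.2⟩
          · rintro ⟨ha, hb', hc'⟩
            rw [List.nodup_cons] at hb'
            refine ⟨by simp only [List.length_cons] at ha; push_cast at ha ⊢; omega, hb'.2, ?_⟩
            intro x hx
            have h3 := hc' x (List.mem_cons.mpr (Or.inr hx))
            refine ⟨h3.1, h3.2.1, ?_⟩
            simp only [List.mem_cons, not_or]
            exact ⟨fun hxe => hb'.1 (hxe ▸ hx), h3.2.2⟩
        · have hvalm : PySem.List.pyGet? (pvNums n seen) (((c.toNat : Int) - 48) - 1) =
              some (-1 : Int) := by rw [hval, if_neg hseen, if_neg hlt]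
          simp only [hvalm]
          rw [if_pos (by decide)]
          symm
          rw [decide_eq_false_iff_not]
          rintro ⟨-, -, h3⟩
          have := h3 ((c.toNat : Int) - 48) (by simp [pvVals])
          omega

theorem pv_mapM_digits (cs : List Char) (hd : ∀ c ∈ cs, c.isDigit = true) :
    cs.mapM (fun c => PySem.Int.ofChars? [c]) = some (pvVals cs) := by
  induction cs with
  | nil => simp [pvVals]
  | cons c rest ih =>
    have hc := hd c (by simp)
    simp only [List.mapM_cons, pv_ofChars_digit c hc, ih (fun x hx => hd x (by simp [hx]))]
    simp [pvVals]

theorem pv_sorted_range_iff (ds : List Int) :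
    (PySem.List.sorted ds (fun x => x) false = PySem.List.pyRange 1 ((ds.length : Int) + 1) 1)
      ↔ (ds.Nodup ∧ ∀ d ∈ ds, 1 ≤ d ∧ d ≤ (ds.length : Int)) := by
  constructor
  · intro h
    have hp : (PySem.List.sorted ds (fun x => x) false).Perm ds := PySem.List.sorted_perm ds _ false
    rw [h] at hp
    refine ⟨hp.nodup (PySem.List.nodup_pyRange_one _ _), ?_⟩
    intro d hdm
    have : d ∈ PySem.List.pyRange 1 ((ds.length : Int) + 1) 1 := hp.mem_iff.mpr hdm
    have := PySem.List.mem_pyRange_one.mp this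
    omega
  · rintro ⟨hnd, hb⟩
    have hsub : ds ⊆ PySem.List.pyRange 1 ((ds.length : Int) + 1) 1 := by
      intro d hdm
      exact PySem.List.mem_pyRange_one.mpr (by have := hb d hdm; omega)
    have hsp := List.subperm_of_subset hnd hsub
    have hlen : (PySem.List.pyRange 1 ((ds.length : Int) + 1) 1).length ≤ ds.length := by
      simp [PySem.List.length_pyRange_one]
    have hperm := hsp.perm_of_length_le hlen
    exact PySem.List.sorted_eq_of_perm_of_pairwise_lt ds _ (fun x => x) hperm.symm
      (PySem.List.pairwise_lt_pyRange_one _ _)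

-- ===== VERDICT (by name: the statement is the Claim_ definition above) =====
theorem isNPandigital_spec : Claim_equal_isNPandigital := by
  intro number _ hpre
  unfold Spec_isNPandigital
  have hdigits := pv_toChars_digits number hpre
  have eA : isNPandigital number =
      pvNPLoop ((PySem.Int.toChars number).length : Int)
        ((PySem.List.pyRange 0 10 1).map
          (fun i => if i < ((PySem.Int.toChars number).length : Int) then (0 : Int) else -1))
        0 (PySem.Int.toChars number) := by
    simp only [isNPandigital, PySem.Int.toList_toStr]
  have eB : isNPandigital_alt number =
      (PySem.List.sorted (pvVals (PySem.Int.toChars number)) (fun x => x) false ==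
        PySem.List.pyRange 1 (((pvVals (PySem.Int.toChars number)).length : Int) + 1) 1) := by
    simp only [isNPandigital_alt, PySem.Int.toList_toStr, pv_mapM_digits _ hdigits]
  rw [eA, eB]
  have hinit : (PySem.List.pyRange 0 10 1).map
      (fun i => if i < ((PySem.Int.toChars number).length : Int) then (0 : Int) else -1) =
      pvNums ((PySem.Int.toChars number).length : Int) [] := by
    simp [pvNums]
  rw [hinit, pvLoop_eq _ _ _ _ hdigits]
  have hlen : (pvVals (PySem.Int.toChars number)).length = (PySem.Int.toChars number).length := by
    simp [pvVals]
  rw [show (PySem.List.sorted (pvVals (PySem.Int.toChars number)) (fun x => x) false ==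
      PySem.List.pyRange 1 (((pvVals (PySem.Int.toChars number)).length : Int) + 1) 1) =
      decide (PySem.List.sorted (pvVals (PySem.Int.toChars number)) (fun x => x) false =
      PySem.List.pyRange 1 (((pvVals (PySem.Int.toChars number)).length : Int) + 1) 1) from by
        by_cases h : PySem.List.sorted (pvVals (PySem.Int.toChars number)) (fun x => x) false =
            PySem.List.pyRange 1 (((pvVals (PySem.Int.toChars number)).length : Int) + 1) 1 <;>
          simp [h]]
  rw [decide_eq_decide]
  rw [pv_sorted_range_iff, hlen]
  constructor
  · rintro ⟨h1, h2, h3⟩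
    exact ⟨h2, fun d hdm => by have := h3 d hdm; omega⟩
  · rintro ⟨h2, h3⟩
    refine ⟨by omega, h2, fun d hdm => by have := h3 d hdm; simp [this.1, this.2]⟩
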